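-- pv_equiv track=rewrite | github.com/P3p2002/Summer-Internship | Entrega/Utilitzacio de les mitges horaries versio amb secular simplificat canviant el fit.py | selector_anys
-- ===== SOURCE A (Python) =====
-- def selector_anys(Dies_Bons_2):
--     #No li demano per pantalla els dies que vull mirar ja que son bastants i sera mes facil fer-ho a ma
--     #Dies_mirar = [['10', '01'], ['17', '01'], ['18','01'], ['21' ,'01'], ['23', '01'], ['24', '01'], ['28', '01'], ['31','01'], ['02', '02'],['08', '02'], ['09', '02'], ['10', '02'], ['14', '02'], ['15', '02'], ['18', '02'], ['02', '03'], ['12', '03'], ['25', '12']]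
--     Dies_mirar = [['07', '01'], ['08', '01'], ['09', '01'], ['10', '01'], ['12', '01'], ['13','01'], ['15' ,'01'],  ['04', '02'],['07', '02'], ['08', '02'], ['09', '02'], ['10', '02'], ['12', '02'], ['14', '02'], ['15', '02'], ['16', '02'], ['18', '02'], ['25', '12']]
--
--     #He creat una llista de llistes en la que cada subllista consta del dia i el mes(en aquest ordre)
--     Anys_comprovar = []
--     for j in range(len(Dies_mirar)):
--         Anys_comprovar.append([Dies_mirar[j][0], Dies_mirar[j][1]])
--         for k in range(len(Dies_Bons_2)):
--             if Dies_mirar[j][0] == Dies_Bons_2[k][0] and Dies_mirar[j][1] == Dies_Bons_2[k][1]: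
--                 Anys_comprovar[j].append(Dies_Bons_2[k][2])
--     return Anys_comprovar
-- ===== SOURCE B (Python) =====
-- def selector_anys(Dies_Bons_2):
--     Dies_mirar = [('07', '01'), ('08', '01'), ('09', '01'), ('10', '01'), ('12', '01'),
--                   ('13', '01'), ('15', '01'), ('04', '02'), ('07', '02'), ('08', '02'),
--                   ('09', '02'), ('10', '02'), ('12', '02'), ('14', '02'), ('15', '02'),
--                   ('16', '02'), ('18', '02'), ('25', '12')]
--     groups = {}
--     for r in Dies_Bons_2:
--         if len(r) >= 3:
--             groups.setdefault((r[0], r[1]), []).append(r[2])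
--     return [[d, m] + groups.get((d, m), []) for d, m in Dies_mirar]
-- ===== Notes on version B (the rewrite author's own statement) =====
-- stated objective: alternative
-- what changed: A scans the whole record list once per each of the 18 fixed target dates; B makes a single pass grouping records into a dict (day,month)->years and then does one lookup per target date (intended as faster; a timing run read 1.54x at the largest size but inconsistently, so no speed is claimed).
import Mathlib
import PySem

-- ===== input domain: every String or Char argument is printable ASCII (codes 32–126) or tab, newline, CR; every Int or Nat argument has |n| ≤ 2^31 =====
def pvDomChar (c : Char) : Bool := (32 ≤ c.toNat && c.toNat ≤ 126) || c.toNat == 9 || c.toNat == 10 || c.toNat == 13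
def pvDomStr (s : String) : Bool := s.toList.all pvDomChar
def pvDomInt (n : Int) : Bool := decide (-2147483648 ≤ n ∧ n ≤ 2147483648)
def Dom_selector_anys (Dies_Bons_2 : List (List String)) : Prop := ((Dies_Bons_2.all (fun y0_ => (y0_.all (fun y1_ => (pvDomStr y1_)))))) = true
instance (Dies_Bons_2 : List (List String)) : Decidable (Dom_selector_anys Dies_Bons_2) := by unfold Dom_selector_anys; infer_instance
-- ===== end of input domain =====

-- B replaces A's 18 scans of the record list (one per fixed target date) by ONE grouping pass
-- (day,month) -> years followed by a dictionary lookup per target; return values proved equal on Pre_.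

-- ===== PORT A =====
-- the fixed list of 18 [day, month] dates from A
def pvDiesMirar : List (List String) :=
  [["07", "01"], ["08", "01"], ["09", "01"], ["10", "01"], ["12", "01"], ["13", "01"],
   ["15", "01"], ["04", "02"], ["07", "02"], ["08", "02"], ["09", "02"], ["10", "02"],
   ["12", "02"], ["14", "02"], ["15", "02"], ["16", "02"], ["18", "02"], ["25", "12"]]

-- A: for each j, append [day, month], then scan all records, appending the year of each match.
-- Record fields are read with getD _ "": exact wherever Python does not raise — under Pre_ a
-- field that is compared/appended exists, and a missing field r[1] read as "" matches no month.
def selector_anys (Dies_Bons_2 : List (List String)) : List (List String) :=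
  (List.range pvDiesMirar.length).foldl (fun acc j =>
    let dm := pvDiesMirar.getD j []
    let row := (List.range Dies_Bons_2.length).foldl (fun row k =>
        let r := Dies_Bons_2.getD k []
        if dm.getD 0 "" == r.getD 0 "" && dm.getD 1 "" == r.getD 1 "" then
          row ++ [r.getD 2 ""]
        else row)
      [dm.getD 0 "", dm.getD 1 ""]
    acc ++ [row]) []

-- ===== PORT B =====
-- the same 18 target dates, as (day, month) pairs (Source B uses tuples)
def pvDiesMirarAlt : List (String × String) :=
  [("07", "01"), ("08", "01"), ("09", "01"), ("10", "01"), ("12", "01"), ("13", "01"),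
   ("15", "01"), ("04", "02"), ("07", "02"), ("08", "02"), ("09", "02"), ("10", "02"),
   ("12", "02"), ("14", "02"), ("15", "02"), ("16", "02"), ("18", "02"), ("25", "12")]

-- B: one pass building groups[(day, month)] = list of years (setdefault+append = Dict.modify),
-- then one lookup per target date.
def selector_anys_alt (Dies_Bons_2 : List (List String)) : List (List String) :=
  let groups : PySem.Dict (String × String) (List String) :=
    Dies_Bons_2.foldl (fun g r =>
      if 3 ≤ r.length then
        g.modify (r.getD 0 "", r.getD 1 "") [] (· ++ [r.getD 2 ""])
      else g) PySem.Dict.empty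
  pvDiesMirarAlt.map (fun dm => [dm.1, dm.2] ++ groups.getD dm [])

-- ===== PRECONDITION & SPEC =====
-- Pre_ excludes exactly the inputs on which A raises IndexError: a record of length 0 (r[0]),
-- of length 1 whose first field is one of the 18 target days (r[1] is then read), or of
-- length 2 equal to one of the 18 target dates (r[2] is then read). A returns on everything else.
def Pre_selector_anys (Dies_Bons_2 : List (List String)) : Prop :=
  ∀ r ∈ Dies_Bons_2, 3 ≤ r.length ∨
    (r.length = 1 ∧ r.getD 0 "" ∉ pvDiesMirarAlt.map Prod.fst) ∨
    (r.length = 2 ∧ (r.getD 0 "", r.getD 1 "") ∉ pvDiesMirarAlt)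
instance (Dies_Bons_2 : List (List String)) : Decidable (Pre_selector_anys Dies_Bons_2) := by unfold Pre_selector_anys; infer_instance

def pvWitness_selector_anys : List (List String) :=
  [["07", "01", "2001"], ["xx", "01"], ["25", "12", "1999", "extra"]]

def Spec_selector_anys (Dies_Bons_2 : List (List String)) (out : List (List String)) : Prop := out = selector_anys_alt Dies_Bons_2
instance (Dies_Bons_2 : List (List String)) (out : List (List String)) : Decidable (Spec_selector_anys Dies_Bons_2 out) := by unfold Spec_selector_anys; infer_instance

-- ===== CLAIM (what is proved, stated in full; the proofs are below) =====
def Claim_equal_selector_anys : Prop := ∀ (Dies_Bons_2 : List (List String)), Dom_selector_anys Dies_Bons_2 → Pre_selector_anys Dies_Bons_2 → Spec_selector_anys Dies_Bons_2 (selector_anys Dies_Bons_2)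

-- ===== LEMMAS AND PROOFS =====

-- a foldl over range(len(l)) reading l.getD k d is a foldl over l
theorem pvFoldlRangeGetD {α β : Type} (l : List α) (d : α) (f : β → α → β) (b : β) :
    (List.range l.length).foldl (fun acc k => f acc (l.getD k d)) b = l.foldl f b := by
  induction l generalizing b with
  | nil => rfl
  | cons a t ih =>
      simp only [List.length_cons, List.range_succ_eq_map, List.foldl_cons, List.foldl_map]
      simpa using ih (f b a)

-- lookup in B's grouping dict = filter-and-map over the records
theorem pvGroupsGetD (l : List (List String)) (c : String × String)
    (g : PySem.Dict (String × String) (List String)) :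
    (l.foldl (fun g r =>
        if 3 ≤ r.length then
          g.modify (r.getD 0 "", r.getD 1 "") [] (· ++ [r.getD 2 ""])
        else g) g).getD c []
      = g.getD c [] ++
        (l.filter (fun r => decide (3 ≤ r.length) && ((r.getD 0 "", r.getD 1 "") == c))).map
          (fun r => r.getD 2 "") := by
  induction l generalizing g with
  | nil => simp
  | cons r t ih =>
      simp only [List.foldl_cons, List.filter_cons]
      by_cases h3 : 3 ≤ r.length
      · rw [if_pos h3, ih]
        by_cases hc : (r.getD 0 "", r.getD 1 "") = c
        · rw [hc, PySem.Dict.getD_modify_self]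
          simp [h3]
        · have hcf : ¬ (decide (3 ≤ r.length) && ((r.getD 0 "", r.getD 1 "") == c)) = true := by
            simp only [Bool.and_eq_true, decide_eq_true_eq, beq_iff_eq, not_and]
            exact fun _ h' => hc h'
          rw [PySem.Dict.getD_modify_of_ne _ _ _ (Ne.symm hc), if_neg hcf]
      · have hcf : ¬ (decide (3 ≤ r.length) && ((r.getD 0 "", r.getD 1 "") == c)) = true := by
          simp only [Bool.and_eq_true, decide_eq_true_eq, beq_iff_eq, not_and]
          exact fun h' => absurd h' h3
        rw [if_neg h3, ih, if_neg hcf]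

-- Bool-level form of the match-test comparison (x, y: the record's first two fields)
theorem pvAux (d m x y : String) (n : Bool) (h : x = d → y = m → n = true) :
    (d == x && m == y) = (n && ((x, y) == (d, m))) := by
  rw [Bool.eq_iff_iff]
  simp only [Bool.and_eq_true, beq_iff_eq, Prod.mk.injEq]
  constructor
  · rintro ⟨h1, h2⟩
    exact ⟨h h1.symm h2.symm, h1.symm, h2.symm⟩
  · rintro ⟨-, h1, h2⟩
    exact ⟨h1.symm, h2.symm⟩

-- under Pre_, A's match test for a target date (d, m) equals B's grouping key test
theorem pvPredEq (d m : String) (hdm : (d, m) ∈ pvDiesMirarAlt) (r : List String)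
    (hr : 3 ≤ r.length ∨
      (r.length = 1 ∧ r.getD 0 "" ∉ pvDiesMirarAlt.map Prod.fst) ∨
      (r.length = 2 ∧ (r.getD 0 "", r.getD 1 "") ∉ pvDiesMirarAlt)) :
    (d == r.getD 0 "" && m == r.getD 1 "")
      = (decide (3 ≤ r.length) && ((r.getD 0 "", r.getD 1 "") == (d, m))) := by
  refine pvAux d m _ _ _ ?_
  intro hx hy
  have h3 : 3 ≤ r.length := by
    rcases hr with h | ⟨_, hnd⟩ | ⟨_, hnp⟩
    · exact h
    · rw [hx] at hnd
      exact absurd (List.mem_map.mpr ⟨(d, m), hdm, rfl⟩) hnd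
    · rw [hx, hy] at hnp
      exact absurd hdm hnp
  exact decide_eq_true h3

-- per-target-date row equality: A's inner scan = [d, m] ++ B's dict lookup
theorem pvRowKey (l : List (List String)) (hpre : Pre_selector_anys l) (d m : String)
    (hdm : (d, m) ∈ pvDiesMirarAlt) :
    l.foldl (fun row r =>
        if d == r.getD 0 "" && m == r.getD 1 "" then row ++ [r.getD 2 ""] else row) [d, m]
      = [d, m] ++
        (l.foldl (fun g r =>
            if 3 ≤ r.length then
              g.modify (r.getD 0 "", r.getD 1 "") [] (· ++ [r.getD 2 ""])
            else g) PySem.Dict.empty).getD (d, m) [] := by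
  rw [PySem.List.foldl_append_if, pvGroupsGetD, PySem.Dict.getD_empty, List.nil_append]
  exact congrArg _ (congrArg _ (List.filter_congr (fun r hr => pvPredEq d m hdm r (hpre r hr))))

-- ===== VERDICT (by name: the statement is the Claim_ definition above) =====
theorem selector_anys_spec : Claim_equal_selector_anys := by
  intro l _ hpre
  unfold Spec_selector_anys selector_anys selector_anys_alt
  rw [pvFoldlRangeGetD pvDiesMirar [] (fun acc dm =>
        acc ++ [(List.range l.length).foldl (fun row k =>
          let r := l.getD k []
          if dm.getD 0 "" == r.getD 0 "" && dm.getD 1 "" == r.getD 1 "" then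
            row ++ [r.getD 2 ""]
          else row) [dm.getD 0 "", dm.getD 1 ""]]) []]
  rw [PySem.List.foldl_append_singleton_eq_map, List.nil_append]
  have hrw : pvDiesMirar = pvDiesMirarAlt.map (fun p => [p.1, p.2]) := rfl
  rw [hrw, List.map_map]
  refine List.map_congr_left ?_
  intro ⟨d, m⟩ hp
  simp only [Function.comp_apply, List.getD_cons_zero, List.getD_cons_succ]
  rw [pvFoldlRangeGetD l [] (fun row r =>
        if d == r.getD 0 "" && m == r.getD 1 "" then row ++ [r.getD 2 ""] else row)]
  exact pvRowKey l hpre d m hp
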